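-- pv_equiv track=rewrite | github.com/ScortarIrina/CS-UBB | Fundamentals of Programming/a1/p1.py | largest_prime_smaller
-- ===== SOURCE A (Python) =====
-- from math import sqrt
--
-- def is_prime(number_to_check):
--     # verifies if a given number is prime
--     if number_to_check == 2:
--         return True
--     if number_to_check < 2 or number_to_check % 2 == 0:
--         return False
--     for i in range(3, int(sqrt(number_to_check)) + 1, 2):
--         if number_to_check % i == 0:
--             return False
--     return True
--
-- def largest_prime_smaller(x):
--     x -= 1
--     while True:
--         if x < 2:  # if there isn't any prime nr smaller than n then the functions returns "false"
--             return False
--         if is_prime(x):  # otherwise, it returns the first prime number it finds (the search starts from n-1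
--             return x
--         x -= 1
-- ===== SOURCE B (Python) =====
-- from math import isqrt
--
-- def largest_prime_smaller(x):
--     # Sieve the base primes up to isqrt(x-1) once, then scan downward from x-1
--     # testing each candidate only against those precomputed primes.
--     n = x - 1
--     if n < 2:
--         return False
--     limit = isqrt(n)
--     composite = set()
--     primes = []
--     for p in range(2, limit + 1):
--         if p not in composite:
--             primes.append(p)
--             composite.update(range(p * p, limit + 1, p))
--     k = n
--     while k >= 2:
--         if all(k % p != 0 for p in primes if p * p <= k):
--             return k
--         k -= 1
--     return False  # unreachable: 2 is prime
-- ===== Notes on version B (the rewrite author's own statement) =====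
-- stated objective: alternative
-- what changed: Replaces A's per-candidate sqrt-bounded odd trial division with a one-time Sieve of Eratosthenes collecting the base primes up to isqrt(x-1), then a downward scan that tests each candidate only against those precomputed primes.
-- outside the precondition, e.g. on largest_prime_smaller(2): A returns False, B returns False; on largest_prime_smaller(-5): A returns False, B returns False
import Mathlib
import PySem

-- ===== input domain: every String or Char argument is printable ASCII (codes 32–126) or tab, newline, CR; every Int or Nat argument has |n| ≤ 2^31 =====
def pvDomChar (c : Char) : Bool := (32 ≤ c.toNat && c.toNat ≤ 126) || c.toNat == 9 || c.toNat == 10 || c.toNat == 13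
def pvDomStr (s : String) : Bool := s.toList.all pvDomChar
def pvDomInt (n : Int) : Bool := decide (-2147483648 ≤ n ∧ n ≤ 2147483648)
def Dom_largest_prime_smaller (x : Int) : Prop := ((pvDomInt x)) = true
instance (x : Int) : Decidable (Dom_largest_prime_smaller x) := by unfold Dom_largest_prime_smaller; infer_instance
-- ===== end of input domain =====

-- B sieves the base primes up to isqrt(x-1) once and scans downward testing only against
-- those primes, instead of A's per-candidate odd trial division; objective: alternative.


-- ===== PORT A =====
-- is_prime: int(sqrt(n)) is ported as Nat.sqrt n.toNat, exact here because a float-rounding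
-- discrepancy of int(sqrt(n)) cannot change is_prime's boolean result.
def pvIsPrimeA (n : Int) : Bool :=
  if n == 2 then true
  else if n < 2 || PySem.Int.mod n 2 == 0 then false
  else (PySem.List.pyRange 3 ((Nat.sqrt n.toNat : Int) + 1) 2).all
        (fun i => !(PySem.Int.mod n i == 0))

-- the 'while True' loop of A; the x < 2 branch returns 0 where Python returns the bool
-- False (outside Pre_, which excludes exactly those inputs)
def pvLoopA (x : Int) : Int :=
  if x < 2 then 0
  else if pvIsPrimeA x then x
  else pvLoopA (x - 1)
termination_by x.toNat
decreasing_by omega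

def largest_prime_smaller (x : Int) : Int := pvLoopA (x - 1)

-- ===== PORT B =====
-- one iteration of the sieve loop's body: skip p if already marked composite, else record
-- it as a base prime and mark its multiples from p*p up to limit
def pvStep (limit : Int) (st : PySem.Set Int × List Int) (p : Int) :
    PySem.Set Int × List Int :=
  if st.1.contains p then st
  else (((PySem.List.pyRange (p * p) (limit + 1) p).foldl PySem.Set.add st.1),
        st.2 ++ [p])

-- the base-prime sieve: fold over range(2, limit+1) carrying (composite set, primes list)
def pvSieve (limit : Int) : PySem.Set Int × List Int :=
  (PySem.List.pyRange 2 (limit + 1) 1).foldl (pvStep limit) (PySem.Set.empty, [])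

-- the downward 'while k >= 2' scan; returns 0 for the (unreachable inside Pre_) fall-through
def pvScanB (primes : List Int) (k : Int) : Int :=
  if 2 ≤ k then
    if primes.all (fun p => if p * p ≤ k then !(PySem.Int.mod k p == 0) else true)
    then k
    else pvScanB primes (k - 1)
  else 0
termination_by k.toNat
decreasing_by omega

def largest_prime_smaller_alt (x : Int) : Int :=
  let n := x - 1
  if n < 2 then 0
  else pvScanB (pvSieve ((Nat.sqrt n.toNat : Int))).2 n

-- ===== PRECONDITION & SPEC =====
-- Pre_ excludes x ≤ 2: there Python A returns the bool False, not an int of the declared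
-- return type (B does the same), so those inputs carry no integer claim.
def Pre_largest_prime_smaller (x : Int) : Prop := 3 ≤ x
instance (x : Int) : Decidable (Pre_largest_prime_smaller x) := by unfold Pre_largest_prime_smaller; infer_instance
def pvWitness_largest_prime_smaller : Int := 10

def Spec_largest_prime_smaller (x : Int) (out : Int) : Prop := out = largest_prime_smaller_alt x
instance (x : Int) (out : Int) : Decidable (Spec_largest_prime_smaller x out) := by unfold Spec_largest_prime_smaller; infer_instance

-- ===== CLAIM (what is proved, stated in full; the proofs are below) =====
def Claim_equal_largest_prime_smaller : Prop := ∀ (x : Int), Dom_largest_prime_smaller x → Pre_largest_prime_smaller x → Spec_largest_prime_smaller x (largest_prime_smaller x)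

-- ===== LEMMAS AND PROOFS =====

-- the sieve fold stopped after processing range(2, m+1), with the mark bound limit fixed
def pvSieveUpTo (limit m : Int) : PySem.Set Int × List Int :=
  (PySem.List.pyRange 2 (m + 1) 1).foldl (pvStep limit) (PySem.Set.empty, [])

theorem pvSieveUpTo_base (limit m : Int) (h : m < 2) :
    pvSieveUpTo limit m = (PySem.Set.empty, []) := by
  unfold pvSieveUpTo
  rw [PySem.List.pyRange_one_eq_nil (by omega)]
  rfl

theorem pvSieveUpTo_succ (limit m : Int) (h : 2 ≤ m) :
    pvSieveUpTo limit m = pvStep limit (pvSieveUpTo limit (m - 1)) m := by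
  unfold pvSieveUpTo
  have hm : m - 1 + 1 = m := by ring
  rw [show m + 1 = (m - 1 + 1) + 1 by ring,
      PySem.List.pyRange_one_succ_right (by omega), List.foldl_append, hm]
  rfl

-- sieve invariant: marked numbers are composite, collected base primes are ≥ 2,
-- and every prime ≤ m has been collected
theorem pvSieveUpTo_inv (limit m : Int) :
    (∀ q ∈ (pvSieveUpTo limit m).1, ¬ Nat.Prime q.toNat) ∧
    (∀ p ∈ (pvSieveUpTo limit m).2, 2 ≤ p) ∧
    (∀ q : Int, 2 ≤ q → q ≤ m → Nat.Prime q.toNat → q ∈ (pvSieveUpTo limit m).2) := by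
  by_cases hm : m < 2
  · rw [pvSieveUpTo_base limit m hm]
    refine ⟨by simp [PySem.Set.empty], by simp, ?_⟩
    intro q hq hqm _; omega
  · have h2 : 2 ≤ m := by omega
    obtain ⟨ih1, ih2, ih3⟩ := pvSieveUpTo_inv limit (m - 1)
    rw [pvSieveUpTo_succ limit m h2]
    set st := pvSieveUpTo limit (m - 1) with hst
    unfold pvStep
    by_cases hc : st.1.contains m
    · simp only [hc, if_true]
      refine ⟨ih1, ih2, ?_⟩
      intro q hq hqm hqp
      rcases eq_or_lt_of_le hqm with hqe | hql
      · exfalso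
        exact ih1 q (by rw [← hqe] at hc; exact (PySem.Set.contains_iff _ _).mp hc) hqp
      · exact ih3 q hq (by omega) hqp
    · simp only [hc, if_false, Bool.false_eq_true]
      refine ⟨?_, ?_, ?_⟩
      · intro q hqmem
        rw [← PySem.Set.update_eq_foldl] at hqmem
        rcases (PySem.Set.mem_update _ _ _).mp hqmem with hin | hrange
        · exact ih1 q hin
        · obtain ⟨hlo, _, hdvd⟩ :=
            (PySem.List.mem_pyRange_iff_of_pos (by omega) q).mp hrange
          have hmq : m ∣ q := by
            obtain ⟨c, hc'⟩ := hdvd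
            exact ⟨m + c, by linarith⟩
          intro hp
          have hq0 : 0 ≤ q := by nlinarith
          have hdn : m.toNat ∣ q.toNat := by
            rwa [← Int.natCast_dvd_natCast, Int.toNat_of_nonneg (by omega),
                 Int.toNat_of_nonneg hq0]
          rcases hp.eq_one_or_self_of_dvd m.toNat hdn with h1 | hs
          · omega
          · have : m = q := by omega
            nlinarith
      · intro p hp
        rcases List.mem_append.mp hp with h | h
        · exact ih2 p h
        · simp at h; omega
      · intro q hq hqm hqp
        rcases eq_or_lt_of_le hqm with hqe | hql
        · exact List.mem_append.mpr (Or.inr (by simp [hqe]))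
        · exact List.mem_append.mpr (Or.inl (ih3 q hq (by omega) hqp))
termination_by m.toNat
decreasing_by omega

theorem pvSieve_lower (limit : Int) : ∀ p ∈ (pvSieve limit).2, 2 ≤ p :=
  (pvSieveUpTo_inv limit limit).2.1

theorem pvSieve_complete (limit : Int) :
    ∀ q : Int, 2 ≤ q → q ≤ limit → Nat.Prime q.toNat → q ∈ (pvSieve limit).2 :=
  (pvSieveUpTo_inv limit limit).2.2

-- A's primality test computes primality of k.toNat, for 2 ≤ k
theorem pvIsPrimeA_iff (k : Int) (hk : 2 ≤ k) :
    pvIsPrimeA k = true ↔ Nat.Prime k.toNat := by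
  obtain ⟨N, hkN⟩ : ∃ N : ℕ, (N : Int) = k := ⟨k.toNat, Int.toNat_of_nonneg (by omega)⟩
  have hNt : k.toNat = N := by omega
  have hN2 : 2 ≤ N := by omega
  unfold pvIsPrimeA
  rw [hNt]
  by_cases hk2 : k = 2
  · simp only [hk2, beq_self_eq_true, if_true, true_iff]
    have : N = 2 := by omega
    rw [this]; exact Nat.prime_two
  · have hbeq : (k == 2) = false := by simp [hk2]
    have hk3 : 3 ≤ k := by omega
    simp only [hbeq, Bool.false_eq_true, if_false, show ¬ (k < 2) by omega,
               decide_false, Bool.false_or]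
    by_cases he : PySem.Int.mod k 2 = 0
    · simp only [he, beq_self_eq_true, if_true]
      rw [show (false = true) = False by simp, false_iff]
      have h2d : (2 : Int) ∣ k := (PySem.Int.mod_eq_zero_iff_dvd k 2).mp he
      have h2N : 2 ∣ N := by rw [← hkN] at h2d; exact_mod_cast h2d
      intro hp
      rcases hp.eq_one_or_self_of_dvd 2 h2N with h1 | hs <;> omega
    · have hodd : ¬ (2 : Int) ∣ k := fun hd =>
        he ((PySem.Int.mod_eq_zero_iff_dvd k 2).mpr hd)
      simp only [show (PySem.Int.mod k 2 == 0) = false by simpa using he,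
                 Bool.false_eq_true, if_false]
      rw [List.all_eq_true]
      constructor
      · intro hall
        by_contra hnp
        set q := N.minFac with hq
        have hqp : q.Prime := Nat.minFac_prime (by omega)
        have hqd : q ∣ N := Nat.minFac_dvd N
        have hqsq : q * q ≤ N := by
          have := Nat.minFac_sq_le_self (by omega : 0 < N) hnp
          nlinarith [this]
        have hq2' : 2 ≤ q := hqp.two_le
        have hqne2 : q ≠ 2 := by
          intro h2
          apply hodd
          rw [← hkN]
          exact_mod_cast Int.natCast_dvd_natCast.mpr (h2 ▸ hqd)
        have hqodd : q % 2 = 1 := Nat.odd_iff.mp (hqp.odd_of_ne_two hqne2)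
        have hqs : q ≤ Nat.sqrt N := Nat.le_sqrt.mpr hqsq
        have hmem : (q : Int) ∈ PySem.List.pyRange 3 ((Nat.sqrt N : Int) + 1) 2 := by
          rw [PySem.List.mem_pyRange_iff_of_pos (by norm_num)]
          refine ⟨by omega, by omega, by omega⟩
        have := hall (q : Int) hmem
        simp only [Bool.not_eq_eq_eq_not, Bool.not_true, beq_eq_false_iff_ne] at this
        apply this
        rw [PySem.Int.mod_eq_zero_iff_dvd, ← hkN]
        exact_mod_cast Int.natCast_dvd_natCast.mpr hqd
      · intro hp i hi
        obtain ⟨hi3, hiu, _⟩ := (PySem.List.mem_pyRange_iff_of_pos (by norm_num) i).mp hi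
        simp only [Bool.not_eq_eq_eq_not, Bool.not_true, beq_eq_false_iff_ne]
        intro hmod
        have hid : i ∣ k := (PySem.Int.mod_eq_zero_iff_dvd k i).mp hmod
        have hidN : i.toNat ∣ N := by
          rw [← hkN, ← Int.toNat_of_nonneg (show (0:Int) ≤ i by omega)] at hid
          exact_mod_cast hid
        have hisq : i.toNat * i.toNat ≤ N :=
          Nat.le_sqrt.mp (by omega)
        rcases hp.eq_one_or_self_of_dvd i.toNat hidN with h1 | hs
        · omega
        · rw [hs] at hisq
          have h2n : 2 * N ≤ N * N := by nlinarith
          omega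

-- B's per-candidate test computes primality of k.toNat, for 2 ≤ k ≤ n
theorem pvTestB_iff (n k : Int) (hk : 2 ≤ k) (hkn : k ≤ n) :
    ((pvSieve ((Nat.sqrt n.toNat : Int))).2.all
      (fun p => if p * p ≤ k then !(PySem.Int.mod k p == 0) else true)) = true
      ↔ Nat.Prime k.toNat := by
  have hkN : (k.toNat : Int) = k := Int.toNat_of_nonneg (by omega)
  set N := k.toNat with hN
  have hN2 : 2 ≤ N := by omega
  rw [List.all_eq_true]
  constructor
  · intro hall
    by_contra hnp
    set q := N.minFac with hq
    have hqp : q.Prime := Nat.minFac_prime (by omega)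
    have hqd : q ∣ N := Nat.minFac_dvd N
    have hqsq : q * q ≤ N := by
      have := Nat.minFac_sq_le_self (by omega : 0 < N) hnp
      nlinarith [this]
    have hq2 : 2 ≤ q := hqp.two_le
    have hqs : q ≤ Nat.sqrt n.toNat := by
      have h1 : q ≤ Nat.sqrt N := Nat.le_sqrt.mpr hqsq
      have h2 : N ≤ n.toNat := by omega
      exact le_trans h1 (Nat.sqrt_le_sqrt h2)
    have hmem : (q : Int) ∈ (pvSieve ((Nat.sqrt n.toNat : Int))).2 :=
      pvSieve_complete _ (q : Int) (by omega) (by omega)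
        (by simpa [Int.toNat_natCast] using hqp)
    have := hall (q : Int) hmem
    have hqqk : (q : Int) * (q : Int) ≤ k := by
      rw [← hkN]; exact_mod_cast hqsq
    simp only [hqqk, if_true, Bool.not_eq_eq_eq_not, Bool.not_true,
               beq_eq_false_iff_ne] at this
    apply this
    rw [PySem.Int.mod_eq_zero_iff_dvd, ← hkN]
    exact_mod_cast Int.natCast_dvd_natCast.mpr hqd
  · intro hp p hpmem
    have hp2 : 2 ≤ p := pvSieve_lower _ p hpmem
    by_cases hsq : p * p ≤ k
    · simp only [hsq, if_true, Bool.not_eq_eq_eq_not, Bool.not_true,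
                 beq_eq_false_iff_ne]
      intro hmod
      have hpd : p ∣ k := (PySem.Int.mod_eq_zero_iff_dvd k p).mp hmod
      have hpdN : p.toNat ∣ N := by
        rwa [← hkN, ← Int.toNat_of_nonneg (show (0:Int) ≤ p by omega),
             Int.natCast_dvd_natCast] at hpd
      rcases hp.eq_one_or_self_of_dvd p.toNat hpdN with h1 | hs
      · omega
      · have hpk : p = k := by omega
        nlinarith
    · simp [hsq]

-- the two scans run in lockstep: at every candidate the two primality tests agree
theorem pvLoop_eq (n k : Int) (hkn : k ≤ n) :
    pvLoopA k = pvScanB (pvSieve ((Nat.sqrt n.toNat : Int))).2 k := by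
  by_cases hk : k < 2
  · unfold pvLoopA pvScanB
    simp [hk, show ¬ (2 ≤ k) by omega]
  · have h2 : 2 ≤ k := by omega
    have htests :
        pvIsPrimeA k =
        ((pvSieve ((Nat.sqrt n.toNat : Int))).2.all
          (fun p => if p * p ≤ k then !(PySem.Int.mod k p == 0) else true)) := by
      rw [Bool.eq_iff_iff, pvIsPrimeA_iff k h2, pvTestB_iff n k h2 hkn]
    unfold pvLoopA pvScanB
    rw [if_neg hk, if_pos h2, ← htests]
    by_cases hprime : pvIsPrimeA k = true
    · rw [if_pos hprime, if_pos hprime]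
    · rw [if_neg hprime, if_neg hprime]
      exact pvLoop_eq n (k - 1) (by omega)
termination_by k.toNat
decreasing_by omega

-- ===== VERDICT (by name: the statement is the Claim_ definition above) =====
theorem largest_prime_smaller_spec : Claim_equal_largest_prime_smaller := by
  intro x _ hpre
  unfold Spec_largest_prime_smaller largest_prime_smaller largest_prime_smaller_alt
  have h2 : ¬ (x - 1 < 2) := by unfold Pre_largest_prime_smaller at hpre; omega
  simp only [h2, if_false]
  exact pvLoop_eq (x - 1) (x - 1) le_rfl
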